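-- pv_equiv track=rewrite | github.com/verdantl/Miscellaneous | webscraping programs/automaticfunctions.py | reddit_html_conversion
-- ===== SOURCE A (Python) =====
-- def reddit_html_conversion(string: str) -> str:
--     """Converts html to the text inside string, and gets rid of the '&amp' that
--     come with the '&' character.
--
--     Precondition: There are no tag characters '<' or '> in the actual text."""
--     converted = ''
--     tag = False
--     for char in string:
--         if char == '<':
--             tag = False
--         elif char == '>':
--             tag = True
--         elif tag:
--             converted += char
--     if '&amp;' in converted:
--         converted = converted.replace('&amp;', '&')
--
--     return converted
-- ===== SOURCE B (Python) =====
-- def reddit_html_conversion(string: str) -> str: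
--     """Delimiter-splitting rewrite: split on '>', drop the text before the
--     first '>', keep each segment only up to its first '<', join and unescape."""
--     parts = string.split('>')
--     pieces = []
--     for part in parts[1:]:
--         pieces.append(part.split('<')[0])
--     return ''.join(pieces).replace('&amp;', '&')
-- ===== Notes on version B (the rewrite author's own statement) =====
-- stated objective: faster
-- what changed: Replaces the character-by-character flag loop that grows the result by repeated string concatenation with delimiter splitting: split on the closing-tag delimiter, drop the leading segment, keep each remaining segment up to its first opening-tag delimiter, join once, and unescape the ampersand entity unconditionally.
import Mathlib
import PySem

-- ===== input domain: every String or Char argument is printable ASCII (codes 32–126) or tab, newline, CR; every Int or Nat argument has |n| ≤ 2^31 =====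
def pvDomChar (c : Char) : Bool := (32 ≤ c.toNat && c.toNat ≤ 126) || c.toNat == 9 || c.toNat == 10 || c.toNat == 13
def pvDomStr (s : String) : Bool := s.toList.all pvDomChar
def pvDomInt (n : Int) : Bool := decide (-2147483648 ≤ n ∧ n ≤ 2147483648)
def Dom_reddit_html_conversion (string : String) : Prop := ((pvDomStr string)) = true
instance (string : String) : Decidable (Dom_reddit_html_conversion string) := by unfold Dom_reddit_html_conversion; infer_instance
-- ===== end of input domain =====

-- B replaces A's character flag loop by delimiter splitting (simpler decomposition, same output).

-- ===== PORT A =====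
-- the body of A's for-loop: flag-driven character collection
def pvStepA (st : List Char × Bool) (c : Char) : List Char × Bool :=
  if c = '<' then (st.1, false)
  else if c = '>' then (st.1, true)
  else if st.2 then (st.1 ++ [c], st.2)
  else st

def reddit_html_conversion (string : String) : String :=
  let r := string.toList.foldl pvStepA ([], false)
  let converted := r.1
  let converted :=
    if PySem.Chars.isIn "&amp;".toList converted
    then PySem.Chars.replace converted "&amp;".toList "&".toList
    else converted
  String.ofList converted

-- ===== PORT B =====
def reddit_html_conversion_alt (string : String) : String :=
  let parts := string.toList.splitOn '>'          -- string.split('>') (single-char sep: exact)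
  -- for part in parts[1:]: pieces.append(part.split('<')[0])   (split never returns [], so [0] never raises)
  let pieces := (parts.drop 1).foldl
    (fun (acc : List (List Char)) part => acc ++ [(part.splitOn '<').headD []]) []
  String.ofList (PySem.Chars.replace (PySem.Chars.join [] pieces) "&amp;".toList "&".toList)

-- ===== PRECONDITION & SPEC =====
def Spec_reddit_html_conversion (string : String) (out : String) : Prop := out = reddit_html_conversion_alt string
instance (string : String) (out : String) : Decidable (Spec_reddit_html_conversion string out) := by unfold Spec_reddit_html_conversion; infer_instance

-- ===== CLAIM (what is proved, stated in full; the proofs are below) =====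
def Claim_equal_reddit_html_conversion : Prop := ∀ (string : String), Dom_reddit_html_conversion string → Spec_reddit_html_conversion string (reddit_html_conversion string)

-- ===== LEMMAS AND PROOFS =====

-- proof-side recursive model of A's loop (collected characters only)
def pvF : List Char → Bool → List Char
  | [], _ => []
  | c :: cs, tag =>
    if c = '<' then pvF cs false
    else if c = '>' then pvF cs true
    else if tag then c :: pvF cs tag
    else pvF cs tag

lemma pvFoldA_eq (cs : List Char) : ∀ (acc : List Char) (tag : Bool),
    (cs.foldl pvStepA (acc, tag)).1 = acc ++ pvF cs tag := by
  induction cs with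
  | nil => intro acc tag; simp [pvF]
  | cons c cs ih =>
    intro acc tag
    by_cases h1 : c = '<'
    · simp [pvF, pvStepA, h1, ih]
    · by_cases h2 : c = '>'
      · simp [pvF, pvStepA, h2, ih]
      · cases tag <;> simp [pvF, pvStepA, h1, h2, ih]

-- first segment of cs (before the first '>'), truncated at its first '<'
def pvP0 (cs : List Char) : List Char := (((cs.splitOn '>').headD []).splitOn '<').headD []
-- B's collected text: every later segment truncated at its first '<'
def pvH (cs : List Char) : List Char :=
  ((cs.splitOn '>').drop 1).flatMap (fun part => (part.splitOn '<').headD [])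

lemma pvSplitOn_cons (a c : Char) (cs : List Char) :
    (c :: cs).splitOn a =
      if c = a then [] :: cs.splitOn a
      else (c :: (cs.splitOn a).headD []) :: (cs.splitOn a).drop 1 := by
  obtain ⟨h, t, ht⟩ := List.exists_cons_of_ne_nil (List.splitOnP_ne_nil (· == a) cs)
  simp only [List.splitOn, List.splitOnP_cons, ht]
  by_cases h1 : c = a <;> simp [h1]

lemma pvF_eq (cs : List Char) : ∀ (tag : Bool),
    pvF cs tag = (if tag then pvP0 cs else []) ++ pvH cs := by
  induction cs with
  | nil => intro tag; simp [pvF, pvP0, pvH, List.splitOn_nil]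
  | cons c cs ih =>
    intro tag
    obtain ⟨h, t, ht⟩ := List.exists_cons_of_ne_nil (List.splitOnP_ne_nil (· == '>') cs)
    have ht' : cs.splitOn '>' = h :: t := ht
    by_cases h1 : c = '<'
    · subst h1
      have hH : pvH ('<' :: cs) = pvH cs := by
        simp [pvH, pvSplitOn_cons]
      have hP : pvP0 ('<' :: cs) = [] := by
        simp [pvP0, pvSplitOn_cons]
      cases tag <;> simp [pvF, ih, hH, hP]
    · by_cases h2 : c = '>'
      · subst h2
        have hH : pvH ('>' :: cs) = pvP0 cs ++ pvH cs := by
          simp [pvH, pvSplitOn_cons, ht', pvP0]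
        have hP : pvP0 ('>' :: cs) = [] := by
          simp [pvP0, pvSplitOn_cons]
        cases tag <;> simp [pvF, ih, hH, hP]
      · have hH : pvH (c :: cs) = pvH cs := by
          simp [pvH, pvSplitOn_cons, h2]
        have hP : pvP0 (c :: cs) = c :: pvP0 cs := by
          simp [pvP0, pvSplitOn_cons, h2, ht', pvSplitOn_cons '<' c, h1]
        cases tag <;> simp [pvF, h1, h2, ih, hH, hP]

-- replace is the identity when the pattern does not occur
lemma pvReplaceGo_of_not_infix (old new : List Char) :
    ∀ (fuel : Nat) (l acc : List Char), ¬ old <:+: l →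
      PySem.Chars.replace.go old new fuel l acc = acc.reverse ++ l := by
  intro fuel
  induction fuel with
  | zero => intro l acc _; simp [PySem.Chars.replace.go]
  | succ n ih =>
    intro l acc hinf
    cases l with
    | nil => simp [PySem.Chars.replace.go]
    | cons c t =>
      have hpre : old.isPrefixOf (c :: t) = false := by
        by_contra h
        exact hinf ((List.isPrefixOf_iff_prefix.mp (by simpa using h)).isInfix)
      have hinf' : ¬ old <:+: t := fun h => hinf (List.infix_cons h)
      simp [PySem.Chars.replace.go, hpre, ih t (c :: acc) hinf']

lemma pvReplace_id (s old new : List Char) (hold : old ≠ []) (h : ¬ old <:+: s) :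
    PySem.Chars.replace s old new = s := by
  unfold PySem.Chars.replace
  rw [if_neg (by simp [hold])]
  simpa using pvReplaceGo_of_not_infix old new s.length s [] h

lemma pvJoin_nil (l : List (List Char)) : PySem.Chars.join [] l = l.flatten := by
  simp only [PySem.Chars.join, List.intercalate]
  induction l with
  | nil => simp
  | cons a t ih =>
    cases t with
    | nil => simp
    | cons b t2 => simp_all [List.intersperse]

-- ===== VERDICT (by name: the statement is the Claim_ definition above) =====
theorem reddit_html_conversion_spec : Claim_equal_reddit_html_conversion := by
  intro s _
  show reddit_html_conversion s = reddit_html_conversion_alt s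
  simp only [reddit_html_conversion, reddit_html_conversion_alt]
  have hA : (s.toList.foldl pvStepA ([], false)).1 = pvH s.toList := by
    rw [pvFoldA_eq, pvF_eq]; simp
  have hfold := PySem.List.foldl_append_singleton_eq_map
      (fun part => (List.splitOn '<' part).headD []) ((s.toList.splitOn '>').drop 1)
      ([] : List (List Char))
  rw [List.nil_append] at hfold
  have hB : PySem.Chars.join []
      ((s.toList.splitOn '>').drop 1 |>.foldl
        (fun (acc : List (List Char)) part => acc ++ [(part.splitOn '<').headD []]) [])
      = pvH s.toList := by
    rw [hfold, pvJoin_nil]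
    simp [pvH, List.flatMap_def]
  rw [hA, hB]
  by_cases h : PySem.Chars.isIn "&amp;".toList (pvH s.toList)
  · rw [if_pos h]
  · rw [if_neg h, pvReplace_id _ _ _ (by decide)
      ((PySem.Chars.isIn_eq_false_iff _ _).mp ((Bool.not_eq_true _).mp h))]
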